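-- pv_equiv track=rewrite | github.com/wangyuheng/cinder | cinder_cli/extended_proxy_decision.py | _select_simple
-- ===== SOURCE A (Python) =====
-- from typing import Any
--
-- def _select_simple(options: list[dict[str, Any]]) -> dict[str, Any]:
--     """Select option with least detail."""
--     if not options:
--         return {}
--
--     scored_options = []
--     for option in options:
--         detail_level = option.get("detail_level", "medium")
--         score = {"low": 3, "medium": 2, "high": 1}.get(detail_level, 2)
--         scored_options.append((option, score))
--
--     scored_options.sort(key=lambda x: x[1], reverse=True)
--     return scored_options[0][0]
-- ===== SOURCE B (Python) =====
-- def _select_simple(options):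
--     """Select option with least detail: tiered scan instead of score-sort."""
--     if not options:
--         return {}
--     # score 3 tier: explicit "low"
--     for opt in options:
--         if opt.get("detail_level", "medium") == "low":
--             return opt
--     # score 2 tier: "medium" or any unknown/missing level
--     for opt in options:
--         if opt.get("detail_level", "medium") not in ("low", "high"):
--             return opt
--     # all "high" (score 1): stable sort keeps the first one first
--     return options[0]
-- ===== Notes on version B (the rewrite author's own statement) =====
-- stated objective: alternative
-- what changed: Replaces build-scored-pairs + stable descending sort + take-head by tiered linear scans over the fixed score set: return the first 'low' option, else the first 'medium'/unknown option, else the first option.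
import Mathlib
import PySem

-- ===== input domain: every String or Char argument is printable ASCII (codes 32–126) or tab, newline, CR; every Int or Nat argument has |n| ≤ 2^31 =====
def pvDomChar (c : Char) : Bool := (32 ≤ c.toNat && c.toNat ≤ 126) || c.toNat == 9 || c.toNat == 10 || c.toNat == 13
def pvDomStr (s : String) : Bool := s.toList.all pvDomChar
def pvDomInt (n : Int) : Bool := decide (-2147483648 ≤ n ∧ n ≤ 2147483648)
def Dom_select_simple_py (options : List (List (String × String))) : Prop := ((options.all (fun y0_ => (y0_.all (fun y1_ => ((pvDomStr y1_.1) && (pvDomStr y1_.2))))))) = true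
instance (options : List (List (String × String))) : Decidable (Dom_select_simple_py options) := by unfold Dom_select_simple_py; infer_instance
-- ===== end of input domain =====

-- B replaces score-then-stable-sort by tiered first-match scans over the fixed score set (alternative decomposition, same result).

-- ===== PORT A =====
-- literal port of _select_simple: guard, build scored pairs, stable descending sort by score, take scored_options[0][0]
def select_simple_py (options : List (List (String × String))) : List (String × String) :=
  if options = [] then []
  else
    let scored_options := options.foldl (fun acc option =>
      let detail_level := PySem.Dict.getD ⟨option⟩ "detail_level" "medium"
      let score := PySem.Dict.getD ⟨[("low", (3 : Int)), ("medium", 2), ("high", 1)]⟩ detail_level 2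
      acc ++ [(option, score)]) []
    (PySem.List.pyGetD (PySem.List.sorted scored_options (fun x => x.2) true) 0 ([], 0)).1

-- ===== PORT B =====
-- port of Source B: first option with detail_level "low"; else first with "medium"/unknown/missing; else options[0]
def select_simple_py_alt (options : List (List (String × String))) : List (String × String) :=
  match options with
  | [] => []
  | o :: _ =>
    match options.find? (fun opt => PySem.Dict.getD ⟨opt⟩ "detail_level" "medium" == "low") with
    | some opt => opt
    | none =>
      match options.find? (fun opt =>
          let d := PySem.Dict.getD ⟨opt⟩ "detail_level" "medium"
          d != "low" && d != "high") with
      | some opt => opt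
      | none => o

-- ===== PRECONDITION & SPEC =====
def Spec_select_simple_py (options : List (List (String × String))) (out : List (String × String)) : Prop := out = select_simple_py_alt options
instance (options : List (List (String × String))) (out : List (String × String)) : Decidable (Spec_select_simple_py options out) := by unfold Spec_select_simple_py; infer_instance

-- ===== CLAIM (what is proved, stated in full; the proofs are below) =====
def Claim_equal_select_simple_py : Prop := ∀ (options : List (List (String × String))), Dom_select_simple_py options → Spec_select_simple_py options (select_simple_py options)

-- ===== LEMMAS AND PROOFS =====

-- the score A assigns to an option (proof-side abbreviation of A's two dict lookups)
def scOf (o : List (String × String)) : Int :=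
  PySem.Dict.getD ⟨[("low", (3 : Int)), ("medium", 2), ("high", 1)]⟩
    (PySem.Dict.getD ⟨o⟩ "detail_level" "medium") 2

lemma scOf_cases (o : List (String × String)) :
    (scOf o = 3 ∧ (PySem.Dict.getD ⟨o⟩ "detail_level" "medium" == "low") = true
        ∧ ((PySem.Dict.getD ⟨o⟩ "detail_level" "medium" != "low")
            && (PySem.Dict.getD ⟨o⟩ "detail_level" "medium" != "high")) = false)
    ∨ (scOf o = 1 ∧ (PySem.Dict.getD ⟨o⟩ "detail_level" "medium" == "low") = false
        ∧ ((PySem.Dict.getD ⟨o⟩ "detail_level" "medium" != "low")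
            && (PySem.Dict.getD ⟨o⟩ "detail_level" "medium" != "high")) = false)
    ∨ (scOf o = 2 ∧ (PySem.Dict.getD ⟨o⟩ "detail_level" "medium" == "low") = false
        ∧ ((PySem.Dict.getD ⟨o⟩ "detail_level" "medium" != "low")
            && (PySem.Dict.getD ⟨o⟩ "detail_level" "medium" != "high")) = true) := by
  unfold scOf
  generalize PySem.Dict.getD ⟨o⟩ "detail_level" "medium" = d
  by_cases h1 : d = "low"
  · subst h1; exact Or.inl ⟨by decide, by decide, by decide⟩
  have f1 : (d == "low") = false := beq_eq_false_iff_ne.mpr h1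
  by_cases h2 : d = "high"
  · subst h2; exact Or.inr (Or.inl ⟨by decide, f1, by simp [bne, f1]⟩)
  have f2 : (d == "high") = false := beq_eq_false_iff_ne.mpr h2
  refine Or.inr (Or.inr ⟨?_, f1, by simp [bne, f1, f2]⟩)
  by_cases h3 : d = "medium"
  · subst h3; decide
  · have e1 : ("low" == d) = false := beq_eq_false_iff_ne.mpr (Ne.symm h1)
    have e2 : ("high" == d) = false := beq_eq_false_iff_ne.mpr (Ne.symm h2)
    have e3 : ("medium" == d) = false := beq_eq_false_iff_ne.mpr (Ne.symm h3)
    simp [PySem.Dict.getD, PySem.Dict.get?, List.find?, e1, e2, e3]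

-- head of repeated insertBy starting from a nonempty accumulator is the strict running extremum
lemma foldl_insertBy_head {α : Type} (before : α → α → Bool) :
    ∀ (xs : List α) (y : α) (ys : List α),
      ∃ t, xs.foldl (fun acc x => PySem.List.insertBy before x acc) (y :: ys)
            = (xs.foldl (fun h x => if before x h then x else h) y) :: t := by
  intro xs
  induction xs with
  | nil => intro y ys; exact ⟨ys, rfl⟩
  | cons x xs ih =>
    intro y ys
    simp only [List.foldl_cons, PySem.List.insertBy]
    by_cases h : before x y
    · simpa [h] using ih x (y :: ys)
    · simpa [h] using ih y (PySem.List.insertBy before x ys)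

-- running strict max of (option, score) pairs equals B's tiered first-match selection
lemma foldl_max_eq_alt :
    ∀ (rest : List (List (String × String))) (o : List (String × String)),
      (rest.foldl (fun h x => if h.2 < scOf x then (x, scOf x) else h) (o, scOf o)).1
        = select_simple_py_alt (o :: rest) := by
  intro rest
  induction rest with
  | nil =>
    intro o
    rcases scOf_cases o with ⟨hs, e1, e2⟩ | ⟨hs, e1, e2⟩ | ⟨hs, e1, e2⟩ <;>
      simp [select_simple_py_alt, List.find?, e1, e2]
  | cons x t ih =>
    intro o
    simp only [List.foldl_cons]
    have hstep : (if ((o, scOf o) : _ × Int).2 < scOf x then (x, scOf x) else (o, scOf o))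
        = ((if scOf o < scOf x then x else o), scOf (if scOf o < scOf x then x else o)) := by
      by_cases h : scOf o < scOf x <;> simp [h]
    rw [hstep, ih]
    rcases scOf_cases o with ⟨hso, eo1, eo2⟩ | ⟨hso, eo1, eo2⟩ | ⟨hso, eo1, eo2⟩ <;>
      rcases scOf_cases x with ⟨hsx, ex1, ex2⟩ | ⟨hsx, ex1, ex2⟩ | ⟨hsx, ex1, ex2⟩ <;>
      simp [hso, hsx, select_simple_py_alt, List.find?, eo1, eo2, ex1, ex2]

-- ===== VERDICT (by name: the statement is the Claim_ definition above) =====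
theorem select_simple_py_spec : Claim_equal_select_simple_py := by
  intro options _
  show select_simple_py options = select_simple_py_alt options
  cases options with
  | nil => rfl
  | cons o rest =>
    unfold select_simple_py
    simp only [if_neg (List.cons_ne_nil o rest)]
    have hmap : (o :: rest).foldl (fun acc option =>
        acc ++ [(option, PySem.Dict.getD ⟨[("low", (3 : Int)), ("medium", 2), ("high", 1)]⟩
          (PySem.Dict.getD ⟨option⟩ "detail_level" "medium") 2)]) []
        = (o :: rest).map (fun option => (option, scOf option)) := by
      rw [PySem.List.foldl_append_singleton_eq_map]
      rfl
    rw [hmap, PySem.List.sorted_rev_eq_foldl_insertBy]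
    simp only [List.map_cons, List.foldl_cons, PySem.List.insertBy]
    obtain ⟨t, ht⟩ := foldl_insertBy_head
      (fun (a b : (List (String × String)) × Int) => decide (b.2 < a.2))
      ((rest.map (fun option => (option, scOf option)))) (o, scOf o) []
    rw [ht, PySem.List.pyGetD_zero_cons, List.foldl_map]
    simpa using foldl_max_eq_alt rest o
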